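-- pv_equiv track=rewrite | github.com/dermie83/Portfolio | clean_and_prep_dataframe.py | extract_specific_event_words
-- ===== SOURCE A (Python) =====
-- def extract_specific_event_words(text, target_words_list):
--     """
--     Checks for the presence of specific words from a predefined list within a given text
--     and returns a space-separated string of only those found words (unique per row).
--
--     Args:
--         text (str): The input string (expected to be already cleaned/lowercased).
--         target_words_list (list): A list of words to look for.
--
--     Returns:
--         str: A space-separated string of found target words, or an empty string if none are found.
--     """
--     if not isinstance(text, str):
--         return ""
--
--     # Split the text into individual words
--     words_in_text = text.split()
--
--     unique_found_words_ordered = []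
--     seen_found_words = set() # Use a set to track words already added for this row
--
--     for word in words_in_text:
--         # Check if the word is in our target list and hasn't been added yet for this row
--         if word in target_words_list and word not in seen_found_words:
--             unique_found_words_ordered.append(word)
--             seen_found_words.add(word)
--     if not unique_found_words_ordered:
--         return None
--     else:
--         return ' '.join(unique_found_words_ordered)
-- ===== SOURCE B (Python) =====
-- def extract_specific_event_words(text, target_words_list):
--     if not isinstance(text, str):
--         return ""
--     # Index pass: first occurrence position of every word in the text.
--     first_pos = {}
--     for i, w in enumerate(text.split()):
--         first_pos.setdefault(w, i)
--     # Target-driven pass: the distinct targets that occur, ordered by where they first occur.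
--     candidates = [w for w in dict.fromkeys(target_words_list) if w in first_pos]
--     hits = sorted(candidates, key=lambda w: first_pos[w])
--     return ' '.join(hits) if hits else None
-- ===== Notes on version B (the rewrite author's own statement) =====
-- stated objective: alternative
-- what changed: B replaces A's single text scan with a seen-set by a different algorithm: it builds a first-occurrence position index of the text, collects the distinct targets that occur by iterating over the target list instead of the text, and sorts them by first position.
import Mathlib
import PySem

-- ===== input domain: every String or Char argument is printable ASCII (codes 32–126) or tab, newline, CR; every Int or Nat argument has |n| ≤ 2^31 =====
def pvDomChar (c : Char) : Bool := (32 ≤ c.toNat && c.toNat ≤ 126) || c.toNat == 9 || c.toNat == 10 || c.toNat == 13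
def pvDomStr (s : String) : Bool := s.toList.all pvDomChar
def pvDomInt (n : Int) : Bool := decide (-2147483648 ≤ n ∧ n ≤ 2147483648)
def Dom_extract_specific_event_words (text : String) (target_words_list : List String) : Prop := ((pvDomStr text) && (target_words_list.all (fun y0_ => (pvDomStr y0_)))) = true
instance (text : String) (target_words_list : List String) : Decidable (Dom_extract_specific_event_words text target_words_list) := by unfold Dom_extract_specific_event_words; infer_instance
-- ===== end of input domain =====

-- B replaces A's single text scan with a seen-set by a different algorithm: a first-occurrence
-- position index over the text, a target-driven collection pass, and a sort by first position.
-- (text : String means the non-string guard branch of the Pythons is unreachable here.)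

-- ===== PORT A =====
def extract_specific_event_words (text : String) (target_words_list : List String) : Option String :=
  let words_in_text := PySem.Str.split₀ text
  let st := words_in_text.foldl
    (fun (p : List String × PySem.Set String) word =>
      if target_words_list.contains word && !(PySem.Set.contains p.2 word) then
        (p.1 ++ [word], PySem.Set.add p.2 word)
      else p)
    ([], PySem.Set.empty)
  if st.1 = [] then none else some (PySem.Str.join " " st.1)

-- ===== PORT B =====
def extract_specific_event_words_alt (text : String) (target_words_list : List String) : Option String :=
  let first_pos := (PySem.List.enumerate (PySem.Str.split₀ text)).foldl
    (fun d (iw : Int × String) => PySem.Dict.setdefault d iw.2 iw.1)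
    PySem.Dict.empty
  let candidates := (PySem.List.dedup target_words_list).filter
    (fun w => PySem.Dict.contains first_pos w)
  -- the key lambda 'first_pos[w]': every candidate is a key of first_pos, so the lookup
  -- always succeeds and getD's default is never reached
  let hits := PySem.List.sorted candidates (fun w => PySem.Dict.getD first_pos w 0) false
  if hits ≠ [] then some (PySem.Str.join " " hits) else none

-- ===== PRECONDITION & SPEC =====
def Spec_extract_specific_event_words (text : String) (target_words_list : List String) (out : Option String) : Prop := out = extract_specific_event_words_alt text target_words_list
instance (text : String) (target_words_list : List String) (out : Option String) : Decidable (Spec_extract_specific_event_words text target_words_list out) := by unfold Spec_extract_specific_event_words; infer_instance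

-- ===== CLAIM (what is proved, stated in full; the proofs are below) =====
def Claim_equal_extract_specific_event_words : Prop := ∀ (text : String) (target_words_list : List String), Dom_extract_specific_event_words text target_words_list → Spec_extract_specific_event_words text target_words_list (extract_specific_event_words text target_words_list)

-- ===== LEMMAS AND PROOFS =====

lemma add_of_contains (s : PySem.Set String) (w : String) (h : PySem.Set.contains s w = true) :
    PySem.Set.add s w = s := by unfold PySem.Set.add; rw [h]; simp

lemma add_of_not_contains (s : PySem.Set String) (w : String) (h : PySem.Set.contains s w = false) :
    PySem.Set.add s w = s ++ [w] := by unfold PySem.Set.add; rw [h]; simp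

-- A's loop, started with equal list/seen components, keeps them equal and computes Set.update acc (ws.filter p).
lemma loopA_eq_update (tl : List String) (ws : List String) (acc : PySem.Set String) :
    ws.foldl
      (fun (p : List String × PySem.Set String) word =>
        if tl.contains word && !(PySem.Set.contains p.2 word) then
          (p.1 ++ [word], PySem.Set.add p.2 word)
        else p)
      (acc, acc)
    = (PySem.Set.update acc (ws.filter (fun w => tl.contains w)),
       PySem.Set.update acc (ws.filter (fun w => tl.contains w))) := by
  induction ws generalizing acc with
  | nil => rfl
  | cons w ws ih =>
    have hstep : PySem.Set.update acc (w :: List.filter (fun w => tl.contains w) ws)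
        = PySem.Set.update (PySem.Set.add acc w) (List.filter (fun w => tl.contains w) ws) := rfl
    simp only [List.foldl_cons, List.filter_cons]
    by_cases ht : tl.contains w = true
    · by_cases hs : PySem.Set.contains acc w = true
      · have hA : ¬ ((tl.contains w && !(PySem.Set.contains acc w)) = true) := by rw [ht, hs]; simp
        rw [if_neg hA, if_pos ht, ih acc, hstep, add_of_contains acc w hs]
      · rw [Bool.not_eq_true] at hs
        have hA : (tl.contains w && !(PySem.Set.contains acc w)) = true := by rw [ht, hs]; simp
        rw [if_pos hA, if_pos ht, add_of_not_contains acc w hs, ih (acc ++ [w]), hstep,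
          add_of_not_contains acc w hs]
    · rw [Bool.not_eq_true] at ht
      have hA : ¬ ((tl.contains w && !(PySem.Set.contains acc w)) = true) := by rw [ht]; simp
      have hF : ¬ (tl.contains w = true) := by rw [ht]; simp
      rw [if_neg hA, if_neg hF]
      exact ih acc

-- B's setdefault on a fresh key is an insert.
lemma setdefault_fresh {d : PySem.Dict String Int} {k : String} (v : Int)
    (h : d.contains k = false) : PySem.Dict.setdefault d k v = d.insert k v := by
  unfold PySem.Dict.setdefault
  rw [h]; simp
  apply PySem.Dict.ext
  rw [PySem.Dict.items_insert_of_not_contains d v h]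

-- B's index-building fold: for keys not already in d, the dict maps each word to its
-- first index in ws, offset by the enumeration start s.
lemma foldl_setdefault_get? (ws : List String) (s : Int) (d : PySem.Dict String Int) (w : String) :
    PySem.Dict.get? ((PySem.List.enumerate ws s).foldl
      (fun d (iw : Int × String) => PySem.Dict.setdefault d iw.2 iw.1) d) w
    = ((PySem.Dict.get? d w).orElse
        (fun _ => (PySem.List.index? ws w).map (fun n => s + (n : Int)))) := by
  induction ws generalizing s d with
  | nil => cases hd : PySem.Dict.get? d w <;> simp [PySem.List.enumerate_nil, PySem.List.index?, hd, Option.orElse]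
  | cons x ws ih =>
    rw [PySem.List.enumerate_cons, List.foldl_cons]
    by_cases hc : d.contains x = true
    · have hsd : PySem.Dict.setdefault d x s = d := by unfold PySem.Dict.setdefault; rw [hc]; simp
      rw [hsd, ih]
      cases hd : PySem.Dict.get? d w with
      | some v => simp [Option.orElse]
      | none =>
        have hne : x ≠ w := by
          intro he; subst he
          rw [PySem.Dict.contains_eq_isSome_get?, hd] at hc; simp at hc
        rw [PySem.List.index?_cons_of_ne _ hne]
        cases hi : PySem.List.index? ws w
        · simp [Option.orElse]
        · simp [Option.orElse]; ring
    · rw [Bool.not_eq_true] at hc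
      rw [setdefault_fresh s hc, ih]
      by_cases hw : w = x
      · subst hw
        have hd : PySem.Dict.get? d w = none := by
          rw [PySem.Dict.contains_eq_isSome_get?] at hc
          cases h : PySem.Dict.get? d w <;> simp [h] at hc ⊢
        rw [PySem.Dict.get?_insert_self, hd, PySem.List.index?_cons_self]
        simp [Option.orElse]
      · rw [PySem.Dict.get?_insert_of_ne d s hw, PySem.List.index?_cons_of_ne _ (Ne.symm hw)]
        cases hd : PySem.Dict.get? d w with
        | some v => simp [Option.orElse]
        | none =>
          cases hi : PySem.List.index? ws w
          · simp [Option.orElse]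
          · simp [Option.orElse]; ring

lemma ofList_append_singleton (u : List String) (x : String) :
    PySem.Set.ofList (u ++ [x]) = PySem.Set.add (PySem.Set.ofList u) x := by
  rw [PySem.Set.ofList_eq_foldl, PySem.Set.ofList_eq_foldl, List.foldl_append]
  rfl

lemma mem_ofList_self {l : List String} {a : String} (h : a ∈ PySem.Set.ofList l) : a ∈ l :=
  (PySem.Set.mem_ofList l a).mp h

-- the first index of w in l, 0 if absent (only ever used on members of l)
def idxN (l : List String) (w : String) : Nat := (PySem.List.index? l w).getD 0

lemma idxN_lt_length {l : List String} {w : String} (h : w ∈ l) : idxN l w < l.length := by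
  unfold idxN
  cases hi : PySem.List.index? l w with
  | none => rw [PySem.List.index?_eq_none_iff] at hi; exact absurd h hi
  | some k =>
    obtain ⟨hk, -, -⟩ := PySem.List.getElem_of_index?_eq_some hi
    simpa using hk

-- the dedup of a filtered list is ordered by first-occurrence index in the base list
lemma pairwise_idx_filter (p : String → Bool) (l : List String) :
    (PySem.Set.ofList (l.filter p)).Pairwise (fun a b => idxN l a < idxN l b) := by
  induction l using List.reverseRecOn with
  | nil => simp [PySem.Set.ofList]
  | append_singleton t x ih =>
    have hmem : ∀ a ∈ PySem.Set.ofList (t.filter p), a ∈ t := by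
      intro a ha
      exact (List.mem_filter.mp (mem_ofList_self ha)).1
    have himp : ∀ {a b : String}, a ∈ PySem.Set.ofList (t.filter p) →
        b ∈ PySem.Set.ofList (t.filter p) → idxN t a < idxN t b →
        idxN (t ++ [x]) a < idxN (t ++ [x]) b := by
      intro a b ha hb hab
      unfold idxN
      rw [PySem.List.index?_append_of_mem [x] (hmem a ha),
          PySem.List.index?_append_of_mem [x] (hmem b hb)]
      exact hab
    rw [List.filter_append]
    by_cases hp : p x = true
    · simp only [List.filter_cons, List.filter_nil, hp, if_pos]
      rw [ofList_append_singleton]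
      by_cases hx : PySem.Set.contains (PySem.Set.ofList (t.filter p)) x = true
      · unfold PySem.Set.add; rw [hx]; simp only []
        exact ih.imp_of_mem himp
      · rw [Bool.not_eq_true] at hx
        unfold PySem.Set.add; rw [hx]; simp only [Bool.false_eq_true, if_neg, not_false_iff]
        have hxt : x ∉ t := by
          intro hxt
          have : x ∈ PySem.Set.ofList (t.filter p) := by
            rw [PySem.Set.mem_ofList]; exact List.mem_filter.mpr ⟨hxt, hp⟩
          rw [← PySem.Set.contains_iff] at this
          rw [hx] at this; exact absurd this (by simp)
        rw [List.pairwise_append]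
        refine ⟨ih.imp_of_mem himp, List.pairwise_singleton _ _, ?_⟩
        intro a ha b hb
        rw [List.mem_singleton] at hb
        rw [hb]
        unfold idxN
        rw [PySem.List.index?_append_of_mem [x] (hmem a ha),
            PySem.List.index?_append_singleton_self t x hxt]
        have : idxN t a < t.length := idxN_lt_length (hmem a ha)
        unfold idxN at this
        simpa using this
    · rw [show List.filter p [x] = [] by simp [Bool.not_eq_true] at hp; simp [hp], List.append_nil]
      exact ih.imp_of_mem himp

lemma isSome_map_index (ws : List String) (w : String) :
    ((PySem.List.index? ws w).map (fun n => (0:Int) + (n : Int))).isSome = decide (w ∈ ws) := by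
  by_cases h : w ∈ ws
  · rcases Option.isSome_iff_exists.mp ((PySem.List.index?_isSome_iff ws w).mpr h) with ⟨k, hk⟩
    rw [hk]; simp [h]
  · rw [(PySem.List.index?_eq_none_iff ws w).mpr h]; simp [h]

theorem extract_specific_event_words_spec : Claim_equal_extract_specific_event_words := by
  intro text tl _
  show extract_specific_event_words text tl = extract_specific_event_words_alt text tl
  unfold extract_specific_event_words extract_specific_event_words_alt
  dsimp only
  set ws := PySem.Str.split₀ text with hws
  set p : String → Bool := fun w => tl.contains w with hp
  -- A's side
  rw [show (PySem.Set.empty : PySem.Set String) = ([] : List String) from rfl]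
  rw [loopA_eq_update tl ws []]
  set L : List String := PySem.Set.update ([] : PySem.Set String) (ws.filter p) with hL
  have hLofList : L = PySem.Set.ofList (ws.filter p) := rfl
  -- B's side: the first-position dict
  set fp := (PySem.List.enumerate ws 0).foldl
    (fun d (iw : Int × String) => PySem.Dict.setdefault d iw.2 iw.1) PySem.Dict.empty with hfp
  have hget : ∀ w, PySem.Dict.get? fp w
      = (PySem.List.index? ws w).map (fun n => (0:Int) + (n : Int)) := by
    intro w
    rw [hfp, foldl_setdefault_get? ws 0 PySem.Dict.empty w, PySem.Dict.get?_empty]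
    rfl
  have hcontains : ∀ w, PySem.Dict.contains fp w = decide (w ∈ ws) := by
    intro w
    rw [PySem.Dict.contains_eq_isSome_get?, hget w, isSome_map_index]
  -- membership of A's list
  have hmemL : ∀ a, a ∈ L ↔ (a ∈ tl ∧ a ∈ ws) := by
    intro a
    rw [hLofList, PySem.Set.mem_ofList, List.mem_filter]
    constructor
    · rintro ⟨h1, h2⟩; exact ⟨by simpa [hp] using h2, h1⟩
    · rintro ⟨h1, h2⟩; exact ⟨h2, by simpa [hp] using h1⟩
  -- membership of B's candidate list
  set cands := (PySem.List.dedup tl).filter (fun w => PySem.Dict.contains fp w) with hcands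
  have hmemC : ∀ a, a ∈ cands ↔ (a ∈ tl ∧ a ∈ ws) := by
    intro a
    rw [hcands, List.mem_filter]
    simp only [PySem.List.dedup_eq_ofList, PySem.Set.mem_ofList, hcontains]
    simp
  -- the permutation
  have hnodupL : L.Nodup := by rw [hLofList]; exact PySem.Set.nodup_ofList _
  have hnodupC : cands.Nodup := by
    rw [hcands]
    exact List.Nodup.filter _ (by simp)
  have hperm : L.Perm cands := by
    refine (List.perm_ext_iff_of_nodup hnodupL hnodupC).mpr ?_
    intro a; rw [hmemL a, hmemC a]
  -- strict key ordering of A's list under B's sort key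
  have hpair : L.Pairwise (fun a b =>
      (PySem.Dict.getD fp a 0) < (PySem.Dict.getD fp b 0)) := by
    rw [hLofList]
    refine (pairwise_idx_filter p ws).imp_of_mem ?_
    intro a b ha hb hab
    have haws : a ∈ ws := (List.mem_filter.mp (mem_ofList_self ha)).1
    have hbws : b ∈ ws := (List.mem_filter.mp (mem_ofList_self hb)).1
    rcases Option.isSome_iff_exists.mp ((PySem.List.index?_isSome_iff ws a).mpr haws) with ⟨ka, hka⟩
    rcases Option.isSome_iff_exists.mp ((PySem.List.index?_isSome_iff ws b).mpr hbws) with ⟨kb, hkb⟩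
    rw [PySem.Dict.getD_eq_get?_getD, PySem.Dict.getD_eq_get?_getD, hget a, hget b, hka, hkb]
    unfold idxN at hab
    rw [hka, hkb] at hab
    simp at hab ⊢
    exact_mod_cast hab
  -- B's sorted list is exactly A's list
  have hsorted : PySem.List.sorted cands (fun w => PySem.Dict.getD fp w 0) false = L :=
    PySem.List.sorted_eq_of_perm_of_pairwise_lt cands L _ hperm hpair
  rw [hsorted]
  by_cases hLnil : L = []
  · rw [hLnil]; simp
  · rw [if_neg hLnil, if_pos hLnil]
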